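-- pv_equiv track=rewrite | github.com/virat-dagar/PatternPrinter | backend/patterns.py | _chevron_down
-- ===== SOURCE A (Python) =====
-- def _chevron_down(symbol: str, size: int) -> list[str]:
--     rows = []
--     width = size * 2 - 1
--     for row in range(size):
--         line = []
--         for col in range(width):
--             line.append(symbol if col in (row, width - row - 1) else " ")
--         rows.append("".join(line))
--     return rows
-- ===== SOURCE B (Python) =====
-- def _chevron_down(symbol: str, size: int) -> list[str]:
--     if size <= 0:
--         return []
--     width = size * 2 - 1
--     rows = [" " * r + symbol + " " * (width - 2 * r - 2) + symbol + " " * r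
--             for r in range(size - 1)]
--     rows.append(" " * (size - 1) + symbol + " " * (size - 1))
--     return rows
-- ===== Notes on version B (the rewrite author's own statement) =====
-- stated objective: simpler
-- what changed: Each row is produced as a single closed-form string concatenation (left pad + symbol + computed gap + symbol + right pad, last single-symbol row separate) instead of A's inner per-column loop with a membership test per cell.
import Mathlib
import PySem

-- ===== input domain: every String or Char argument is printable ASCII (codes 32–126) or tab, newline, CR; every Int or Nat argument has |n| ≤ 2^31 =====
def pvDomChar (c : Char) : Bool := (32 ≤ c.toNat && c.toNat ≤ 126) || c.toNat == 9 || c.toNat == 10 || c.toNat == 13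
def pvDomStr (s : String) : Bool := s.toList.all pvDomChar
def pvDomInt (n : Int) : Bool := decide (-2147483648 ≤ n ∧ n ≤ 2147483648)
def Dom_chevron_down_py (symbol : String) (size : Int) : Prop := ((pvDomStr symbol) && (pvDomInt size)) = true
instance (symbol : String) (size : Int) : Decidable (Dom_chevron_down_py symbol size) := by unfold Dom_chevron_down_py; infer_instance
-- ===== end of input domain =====

-- B drops A's per-cell loop with its membership test and instead writes each row
-- as one closed-form string concatenation (left pad + symbol + gap + symbol + right
-- pad, last row handled separately): simpler per-row arithmetic, no cell scan.

-- ===== PORT A =====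
def chevron_down_py (symbol : String) (size : Int) : List String :=
  let width := size * 2 - 1
  (PySem.List.pyRange 0 size 1).foldl (fun rows row =>
    let line := (PySem.List.pyRange 0 width 1).foldl (fun line col =>
      line ++ [if col = row ∨ col = width - row - 1 then symbol else " "]) []
    rows ++ [PySem.Str.join "" line]) []

-- ===== PORT B =====
-- Python's ' ' * n: a string of n spaces (empty for n ≤ 0) — exact
def pvSpaces (n : Int) : String := String.ofList (List.replicate n.toNat ' ')

def chevron_down_py_alt (symbol : String) (size : Int) : List String :=
  if size ≤ 0 then []
  else
    let width := size * 2 - 1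
    let rows := (PySem.List.pyRange 0 (size - 1) 1).map (fun r =>
      pvSpaces r ++ symbol ++ pvSpaces (width - 2 * r - 2) ++ symbol ++ pvSpaces r)
    rows ++ [pvSpaces (size - 1) ++ symbol ++ pvSpaces (size - 1)]

-- ===== PRECONDITION & SPEC =====
def Spec_chevron_down_py (symbol : String) (size : Int) (out : List String) : Prop := out = chevron_down_py_alt symbol size
instance (symbol : String) (size : Int) (out : List String) : Decidable (Spec_chevron_down_py symbol size out) := by unfold Spec_chevron_down_py; infer_instance

-- ===== CLAIM (what is proved, stated in full; the proofs are below) =====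
def Claim_equal_chevron_down_py : Prop := ∀ (symbol : String) (size : Int), Dom_chevron_down_py symbol size → Spec_chevron_down_py symbol size (chevron_down_py symbol size)

-- ===== LEMMAS AND PROOFS =====

-- joining with the empty separator is flatten
theorem pv_join_empty (L : List (List Char)) : PySem.Chars.join [] L = L.flatten := by
  induction L with
  | nil => simp [PySem.Chars.join_nil]
  | cons p rest ih =>
    cases rest with
    | nil => simp [PySem.Chars.join_singleton]
    | cons q r => simp [PySem.Chars.join_cons_cons, ih]

theorem pv_toList_pvSpaces (n : Int) : (pvSpaces n).toList = List.replicate n.toNat ' ' := by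
  simp [pvSpaces]

-- A's cell list for row r equals the explicit pad/symbol/gap/symbol/pad list (inner rows)
theorem pv_cells_mid (symbol : String) (size r : Int) (h0 : 0 ≤ r) (hr : r < size - 1) :
    (PySem.List.pyRange 0 (size * 2 - 1) 1).map
        (fun col => if col = r ∨ col = size * 2 - 1 - r - 1 then symbol else " ")
      = List.replicate r.toNat " " ++ [symbol] ++
        List.replicate (size * 2 - 1 - 2 * r - 2).toNat " " ++ [symbol] ++
        List.replicate r.toNat " " := by
  rw [PySem.List.pyRange_one]
  apply List.ext_getElem
  · simp; omega
  · intro k hk hk'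
    simp only [List.getElem_map, List.getElem_range, List.getElem_append,
      List.length_replicate, List.length_append, List.length_cons, List.length_nil,
      List.getElem_replicate, List.getElem_cons]
    have hk2 : k < (size * 2 - 1).toNat := by simpa using hk
    split_ifs <;> first | rfl | omega

-- A's cell list for the last row r = size - 1
theorem pv_cells_last (symbol : String) (size : Int) (h : 0 < size) :
    (PySem.List.pyRange 0 (size * 2 - 1) 1).map
        (fun col => if col = size - 1 ∨ col = size * 2 - 1 - (size - 1) - 1 then symbol else " ")
      = List.replicate (size - 1).toNat " " ++ [symbol] ++ List.replicate (size - 1).toNat " " := by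
  rw [PySem.List.pyRange_one]
  apply List.ext_getElem
  · simp; omega
  · intro k hk hk'
    simp only [List.getElem_map, List.getElem_range, List.getElem_append,
      List.length_replicate, List.length_append, List.length_cons, List.length_nil,
      List.getElem_replicate, List.getElem_cons]
    have hk2 : k < (size * 2 - 1).toNat := by simpa using hk
    split_ifs <;> first | rfl | omega

-- joining such a cell list with "" is the corresponding string concatenation
theorem pv_join_mid (symbol : String) (a b : Int) :
    PySem.Str.join "" (List.replicate a.toNat " " ++ [symbol] ++
        List.replicate b.toNat " " ++ [symbol] ++ List.replicate a.toNat " ")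
      = pvSpaces a ++ symbol ++ pvSpaces b ++ symbol ++ pvSpaces a := by
  apply String.toList_inj.mp
  rw [PySem.Str.toList_join]
  simp only [String.toList_append, pv_toList_pvSpaces, List.map_append, List.map_replicate,
    List.map_cons, List.map_nil]
  rw [show (("" : String).toList) = ([] : List Char) from rfl, pv_join_empty]
  simp [List.flatten_append, show (" " : String).toList = [' '] from rfl]

theorem pv_join_last (symbol : String) (a : Int) :
    PySem.Str.join "" (List.replicate a.toNat " " ++ [symbol] ++ List.replicate a.toNat " ")
      = pvSpaces a ++ symbol ++ pvSpaces a := by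
  apply String.toList_inj.mp
  rw [PySem.Str.toList_join]
  simp only [String.toList_append, pv_toList_pvSpaces, List.map_append, List.map_replicate,
    List.map_cons, List.map_nil]
  rw [show (("" : String).toList) = ([] : List Char) from rfl, pv_join_empty]
  simp [List.flatten_append, show (" " : String).toList = [' '] from rfl]

theorem chevron_down_eq (symbol : String) (size : Int) :
    chevron_down_py symbol size = chevron_down_py_alt symbol size := by
  unfold chevron_down_py chevron_down_py_alt
  by_cases hs : size ≤ 0
  · simp [hs, PySem.List.pyRange_one_eq_nil hs]
  · push Not at hs
    simp only [if_neg (not_le.mpr hs)]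
    rw [PySem.List.foldl_append_singleton_eq_map]
    have hsplit : PySem.List.pyRange 0 size 1
        = PySem.List.pyRange 0 (size - 1) 1 ++ [size - 1] := by
      have := PySem.List.pyRange_one_succ_right (show (0:Int) ≤ size - 1 by omega)
      simpa using this
    rw [hsplit, List.map_append, List.map_singleton, List.nil_append]
    congr 1
    · apply List.map_congr_left
      intro r hr
      rw [PySem.List.mem_pyRange_one] at hr
      rw [PySem.List.foldl_append_singleton_eq_map, List.nil_append,
        pv_cells_mid symbol size r hr.1 hr.2, pv_join_mid]
    · rw [PySem.List.foldl_append_singleton_eq_map, List.nil_append,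
        pv_cells_last symbol size hs, pv_join_last]

-- ===== VERDICT (by name: the statement is the Claim_ definition above) =====
theorem chevron_down_py_spec : Claim_equal_chevron_down_py := by
  intro symbol size _
  unfold Spec_chevron_down_py
  exact chevron_down_eq symbol size
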